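-- pv_equiv track=rewrite | github.com/sarkarsourav86-oss/vanlife-workflows | src/site_photo.py | _match_site
-- ===== SOURCE A (Python) =====
-- def _normalize_name(name: str | None) -> str:
--     """Lowercase + strip 'site' prefix + collapse whitespace.
--
--     Campflare uses 'Site 12' / '12' / 'Ash Ridge' interchangeably; recreation.gov
--     just uses '12' or 'Ash Ridge'. Normalize both ends to compare.
--     """
--     if not name:
--         return ""
--     s = name.strip().lower()
--     if s.startswith("site "):
--         s = s[5:]
--     return " ".join(s.split())
--
-- def _match_site(sites: list[dict], campsite_name: str | None) -> dict | None:
--     """Find the site in `sites` whose name matches `campsite_name`.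
--
--     Strategy: exact normalized match, then prefix match (handles "Loop A 12"
--     vs "12"). If multiple sites match (recreation.gov has duplicate names —
--     e.g. two sites both called "10" at Colter Bay), returns the first one;
--     the photo will be approximately right.
--     """
--     if not campsite_name or not sites:
--         return None
--     target = _normalize_name(campsite_name)
--     if not target:
--         return None
--
--     exact: list[dict] = []
--     contains: list[dict] = []
--     for s in sites:
--         norm = _normalize_name(s.get("name"))
--         if not norm:
--             continue
--         if norm == target:
--             exact.append(s)
--         elif target in norm or norm in target:
--             contains.append(s)
--
--     if exact:
--         return exact[0]
--     if contains:
--         return contains[0]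
--     return None
-- ===== SOURCE B (Python) =====
-- def _normalize_name(name):
--     if not name:
--         return ""
--     s = name.strip().lower()
--     if s.startswith("site "):
--         s = s[5:]
--     return " ".join(s.split())
--
-- def _match_site(sites, campsite_name):
--     """Two priority-ordered passes: return the first exact normalized match,
--     else the first substring (either-direction) match, else None."""
--     if not campsite_name or not sites:
--         return None
--     target = _normalize_name(campsite_name)
--     if not target:
--         return None
--     for s in sites:
--         if _normalize_name(s.get("name")) == target:
--             return s
--     for s in sites:
--         norm = _normalize_name(s.get("name"))
--         if norm and (target in norm or norm in target):
--             return s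
--     return None
-- ===== Notes on version B (the rewrite author's own statement) =====
-- stated objective: simpler
-- what changed: Replaces the single loop that builds two candidate lists with two priority-ordered scans that return the first exact match, else the first substring match, maintaining no lists.
import Mathlib
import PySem

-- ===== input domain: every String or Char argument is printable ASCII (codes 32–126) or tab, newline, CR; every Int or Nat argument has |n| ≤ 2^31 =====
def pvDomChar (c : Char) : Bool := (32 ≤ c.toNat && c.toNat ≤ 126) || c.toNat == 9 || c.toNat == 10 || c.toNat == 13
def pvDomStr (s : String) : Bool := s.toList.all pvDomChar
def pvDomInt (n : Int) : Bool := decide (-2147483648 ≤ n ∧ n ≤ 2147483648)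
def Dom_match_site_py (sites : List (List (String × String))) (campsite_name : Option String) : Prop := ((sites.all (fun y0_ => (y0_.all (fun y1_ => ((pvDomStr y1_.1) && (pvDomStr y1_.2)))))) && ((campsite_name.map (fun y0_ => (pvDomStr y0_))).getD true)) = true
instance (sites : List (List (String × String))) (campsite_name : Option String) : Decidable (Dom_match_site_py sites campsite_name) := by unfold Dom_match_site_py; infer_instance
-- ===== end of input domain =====

-- B reorganizes A's single collecting loop into two priority-ordered scans (first exact match, else first substring match); objective: simpler.

-- shared helper: Python's _normalize_name (used verbatim by both A and B)
def normName (name : Option String) : String :=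
  match name with
  | none => ""
  | some n =>
    if n = "" then ""
    else
      let s := PySem.Str.lower (PySem.Str.strip n)
      let s := if PySem.Str.startswith s "site " then PySem.Str.slice s (some 5) none else s
      PySem.Str.join " " (PySem.Str.split₀ s)

-- ===== PORT A =====
def match_site_py (sites : List (List (String × String))) (campsite_name : Option String) : Option (List (String × String)) :=
  if campsite_name.getD "" = "" ∨ sites = [] then none
  else
    let target := normName campsite_name
    if target = "" then none
    else
      let p := sites.foldl
        (fun (acc : List (List (String × String)) × List (List (String × String))) s =>
          let norm := normName ((PySem.Dict.mk s).get? "name")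
          if norm = "" then acc
          else if norm = target then (acc.1 ++ [s], acc.2)
          else if PySem.Str.isIn target norm || PySem.Str.isIn norm target then (acc.1, acc.2 ++ [s])
          else acc)
        ([], [])
      match p.1 with
      | x :: _ => some x
      | [] =>
        match p.2 with
        | y :: _ => some y
        | [] => none

-- ===== PORT B =====
-- first pass of B: return the first site whose normalized name equals target
def findExactB (target : String) : List (List (String × String)) → Option (List (String × String))
  | [] => none
  | s :: rest =>
    if normName ((PySem.Dict.mk s).get? "name") = target then some s else findExactB target rest

-- second pass of B: first site whose nonempty normalized name is a substring of target or vice versa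
def findContainsB (target : String) : List (List (String × String)) → Option (List (String × String))
  | [] => none
  | s :: rest =>
    let norm := normName ((PySem.Dict.mk s).get? "name")
    if norm ≠ "" ∧ (PySem.Str.isIn target norm || PySem.Str.isIn norm target) then some s
    else findContainsB target rest

def match_site_py_alt (sites : List (List (String × String))) (campsite_name : Option String) : Option (List (String × String)) :=
  if campsite_name.getD "" = "" ∨ sites = [] then none
  else
    let target := normName campsite_name
    if target = "" then none
    else
      match findExactB target sites with
      | some s => some s
      | none => findContainsB target sites

-- ===== PRECONDITION & SPEC =====
def Spec_match_site_py (sites : List (List (String × String))) (campsite_name : Option String) (out : Option (List (String × String))) : Prop := out = match_site_py_alt sites campsite_name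
instance (sites : List (List (String × String))) (campsite_name : Option String) (out : Option (List (String × String))) : Decidable (Spec_match_site_py sites campsite_name out) := by unfold Spec_match_site_py; infer_instance

-- ===== CLAIM (what is proved, stated in full; the proofs are below) =====
def Claim_equal_match_site_py : Prop := ∀ (sites : List (List (String × String))) (campsite_name : Option String), Dom_match_site_py sites campsite_name → Spec_match_site_py sites campsite_name (match_site_py sites campsite_name)

-- ===== LEMMAS AND PROOFS =====

-- predicates selecting A's two candidate lists
def pE (target : String) (s : List (String × String)) : Bool :=
  let norm := normName ((PySem.Dict.mk s).get? "name")
  norm ≠ "" && norm = target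

def pC (target : String) (s : List (String × String)) : Bool :=
  let norm := normName ((PySem.Dict.mk s).get? "name")
  norm ≠ "" && norm ≠ target && (PySem.Str.isIn target norm || PySem.Str.isIn norm target)

-- A's fold builds exactly the two filtered lists, appended to the accumulators
lemma foldA_char (target : String) (sites : List (List (String × String)))
    (e c : List (List (String × String))) :
    sites.foldl
      (fun (acc : List (List (String × String)) × List (List (String × String))) s =>
        let norm := normName ((PySem.Dict.mk s).get? "name")
        if norm = "" then acc
        else if norm = target then (acc.1 ++ [s], acc.2)
        else if PySem.Str.isIn target norm || PySem.Str.isIn norm target then (acc.1, acc.2 ++ [s])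
        else acc)
      (e, c)
    = (e ++ sites.filter (pE target), c ++ sites.filter (pC target)) := by
  induction sites generalizing e c with
  | nil => simp
  | cons s rest ih =>
    simp only [List.foldl_cons, List.filter_cons]
    by_cases h0 : normName ((PySem.Dict.mk s).get? "name") = ""
    · rw [if_pos h0]
      rw [ih]
      simp [pE, pC, h0]
    · rw [if_neg h0]
      by_cases h1 : normName ((PySem.Dict.mk s).get? "name") = target
      · rw [if_pos h1, ih]
        simp [pE, pC, h1]
        exact fun ht => h0 (by rw [h1, ht])
      · rw [if_neg h1]
        by_cases h2 : (PySem.Str.isIn target (normName ((PySem.Dict.mk s).get? "name"))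
            || PySem.Str.isIn (normName ((PySem.Dict.mk s).get? "name")) target) = true
        · rw [if_pos h2, ih]
          simp [pE, pC, h0, h1]
          simp at h2
          rcases h2 with h | h <;> simp [h]
        · rw [if_neg h2, ih]
          simp [pE, pC, h0, h1]
          simp at h2
          simp [h2]

-- B's first pass is head? of A's exact-filtered list (target nonempty)
lemma findExactB_char (target : String) (ht : target ≠ "") (sites : List (List (String × String))) :
    findExactB target sites = (sites.filter (pE target)).head? := by
  induction sites with
  | nil => simp [findExactB]
  | cons s rest ih =>
    simp only [findExactB, List.filter_cons]
    by_cases h1 : normName ((PySem.Dict.mk s).get? "name") = target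
    · have h0 : (pE target s) = true := by
        simp [pE, h1]
        exact fun hts => ht (h1 ▸ hts ▸ h1.symm ▸ rfl)
      rw [if_pos h1, h0]
      simp
    · have h0 : (pE target s) = false := by simp [pE, h1]
      rw [if_neg h1, h0]
      simp [ih]

-- when no exact match exists, B's second pass is head? of A's contains-filtered list
lemma findContainsB_char (target : String) (sites : List (List (String × String)))
    (hno : ∀ s ∈ sites, pE target s = false) :
    findContainsB target sites = (sites.filter (pC target)).head? := by
  induction sites with
  | nil => simp [findContainsB]
  | cons s rest ih =>
    have hs := hno s (List.mem_cons_self)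
    have hrest : ∀ s' ∈ rest, pE target s' = false := fun s' h => hno s' (List.mem_cons_of_mem _ h)
    simp only [findContainsB, List.filter_cons]
    by_cases hcond : normName ((PySem.Dict.mk s).get? "name") ≠ "" ∧
        (PySem.Str.isIn target (normName ((PySem.Dict.mk s).get? "name"))
          || PySem.Str.isIn (normName ((PySem.Dict.mk s).get? "name")) target) = true
    · have h1 : normName ((PySem.Dict.mk s).get? "name") ≠ target := by
        intro h1
        simp [pE, h1] at hs
        exact hcond.1 (h1 ▸ hs)
      have hpC : pC target s = true := by
        simp [pC, hcond.1, h1]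
        simpa using hcond.2
      rw [if_pos hcond, hpC]
      simp
    · have hpC : pC target s = false := by
        simp [pC]
        intro ha hb
        have := fun hor => hcond ⟨ha, hor⟩
        simp at this
        simpa using this
      rw [if_neg hcond, hpC]
      simp [ih hrest]

-- ===== VERDICT (by name: the statement is the Claim_ definition above) =====
theorem match_site_py_spec : Claim_equal_match_site_py := by
  intro sites campsite_name _
  unfold Spec_match_site_py match_site_py match_site_py_alt
  by_cases hg : campsite_name.getD "" = "" ∨ sites = []
  · simp [hg]
  · simp only [hg, if_false]
    by_cases ht : normName campsite_name = ""
    · simp [ht]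
    · simp only [ht, if_false]
      rw [foldA_char, findExactB_char _ ht]
      cases hE : (sites.filter (pE (normName campsite_name))).head? with
      | some x =>
        obtain ⟨l, hl⟩ := List.head?_eq_some_iff.mp hE
        simp [hl]
      | none =>
        have hnil : sites.filter (pE (normName campsite_name)) = [] :=
          List.head?_eq_none_iff.mp hE
        have hno : ∀ s ∈ sites, pE (normName campsite_name) s = false := by
          intro s hs
          by_contra h
          have : s ∈ sites.filter (pE (normName campsite_name)) :=
            List.mem_filter.mpr ⟨hs, by simpa using h⟩
          simp [hnil] at this
        rw [hnil, findContainsB_char _ _ hno]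
        cases hC : (sites.filter (pC (normName campsite_name))).head? with
        | some y =>
          obtain ⟨l, hl⟩ := List.head?_eq_some_iff.mp hC
          simp [hl]
        | none =>
          have : sites.filter (pC (normName campsite_name)) = [] :=
            List.head?_eq_none_iff.mp hC
          simp [this]
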